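-- pv_equiv track=rewrite | github.com/argens-hku/Bridge | src/Bidding.py | validLogical
-- ===== SOURCE A (Python) =====
-- def validLogical (response):
--
-- 	flag = False
--
-- 	for token in response:
-- 		if flag and token in ["+", "/", ")"]:
-- 			return False
-- 		if token == "+" or token == "/" or token == "(":
-- 			flag = True
-- 			continue
-- 		flag = False
-- 	return True
-- ===== SOURCE B (Python) =====
-- def validLogical(response):
--     tokens = list(response)
--     after_opener = {i + 1 for i, t in enumerate(tokens) if t in ("+", "/", "(")}
--     closer_at = {i for i, t in enumerate(tokens) if t in ("+", "/", ")")}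
--     return after_opener.isdisjoint(closer_at)
-- ===== Notes on version B (the rewrite author's own statement) =====
-- stated objective: alternative
-- what changed: Replaced A's one-pass mutable-flag state machine by two staged index-set constructions (positions just after an opener, positions of closers) followed by a set-disjointness test.
import Mathlib
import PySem

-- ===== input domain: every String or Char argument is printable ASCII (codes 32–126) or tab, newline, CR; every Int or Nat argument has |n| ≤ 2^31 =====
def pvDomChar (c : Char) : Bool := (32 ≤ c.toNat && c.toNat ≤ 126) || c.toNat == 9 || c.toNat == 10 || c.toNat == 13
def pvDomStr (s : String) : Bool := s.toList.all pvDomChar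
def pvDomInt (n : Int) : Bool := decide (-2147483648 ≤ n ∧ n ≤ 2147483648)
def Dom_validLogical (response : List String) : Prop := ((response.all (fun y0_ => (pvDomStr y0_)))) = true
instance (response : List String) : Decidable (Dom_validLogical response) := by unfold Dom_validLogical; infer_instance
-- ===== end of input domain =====

-- B replaces A's mutable-flag state machine by two staged index-set passes and a set-disjointness test (alternative decomposition).

-- ===== PORT A =====
-- the for-loop with its mutable flag and early 'return False'
def validLogicalLoop (flag : Bool) (rest : List String) : Bool :=
  match rest with
  | [] => true
  | token :: rest' =>
    if flag && (["+", "/", ")"].contains token) then false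
    else if token == "+" || token == "/" || token == "(" then
      validLogicalLoop true rest'
    else
      validLogicalLoop false rest'

def validLogical (response : List String) : Bool :=
  validLogicalLoop false response

-- ===== PORT B =====
def pvOpener (t : String) : Bool := t == "+" || t == "/" || t == "("
def pvCloser (t : String) : Bool := t == "+" || t == "/" || t == ")"

-- {i + 1 for i, t in enumerate(tokens) if opener t} and {i for i, t in enumerate(tokens) if closer t}, then isdisjoint
def validLogical_alt (response : List String) : Bool :=
  let tokens := response
  let afterOpener : PySem.Set Int :=
    PySem.Set.ofList ((PySem.List.enumerate tokens).filterMap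
      (fun p => if pvOpener p.2 then some (p.1 + 1) else none))
  let closerAt : PySem.Set Int :=
    PySem.Set.ofList ((PySem.List.enumerate tokens).filterMap
      (fun p => if pvCloser p.2 then some p.1 else none))
  PySem.Set.isdisjoint afterOpener closerAt

-- ===== PRECONDITION & SPEC =====
def Spec_validLogical (response : List String) (out : Bool) : Prop := out = validLogical_alt response
instance (response : List String) (out : Bool) : Decidable (Spec_validLogical response out) := by unfold Spec_validLogical; infer_instance

-- ===== CLAIM =====
def Claim_equal_validLogical : Prop := ∀ (response : List String), Dom_validLogical response → Spec_validLogical response (validLogical response)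

-- ===== LEMMAS AND PROOFS =====

-- shared characterisation: an adjacent opener/closer pair exists
def pvBad (toks : List String) : Prop :=
  ∃ k : Nat, ∃ _ : k + 1 < toks.length, pvOpener toks[k] ∧ pvCloser toks[k + 1]

theorem pvBad_nil : ¬ pvBad [] := by rintro ⟨k, h, _⟩; simp at h
theorem pvBad_single (a : String) : ¬ pvBad [a] := by rintro ⟨k, h, _⟩; simp at h

theorem pvBad_cons_cons (a b : String) (l : List String) :
    pvBad (a :: b :: l) ↔ (pvOpener a ∧ pvCloser b) ∨ pvBad (b :: l) := by
  constructor
  · rintro ⟨k, hk, h1, h2⟩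
    cases k with
    | zero => exact Or.inl ⟨h1, h2⟩
    | succ k' =>
      refine Or.inr ⟨k', ?_, ?_, ?_⟩
      · simpa using hk
      · simpa using h1
      · simpa using h2
  · rintro (⟨h1, h2⟩ | ⟨k, hk, h1, h2⟩)
    · refine ⟨0, by simp, ?_, ?_⟩ <;> simpa
    · exact ⟨k + 1, by simpa using hk, by simpa using h1, by simpa using h2⟩

-- A's membership test ["+","/",")"] is the pvCloser predicate
theorem contains_closer (b : String) : (["+", "/", ")"].contains b) = pvCloser b := by
  simp [pvCloser, Bool.or_assoc, beq_eq_decide]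

-- A's loop, started with flag = pvOpener a, accepts iff a :: l has no bad pair
theorem validLogicalLoop_iff (l : List String) (a : String) :
    validLogicalLoop (pvOpener a) l = true ↔ ¬ pvBad (a :: l) := by
  induction l generalizing a with
  | nil => simpa [validLogicalLoop] using (pvBad_single a)
  | cons b l' ih =>
    rw [pvBad_cons_cons]
    show (if pvOpener a && (["+", "/", ")"].contains b) then false
          else if b == "+" || b == "/" || b == "(" then validLogicalLoop true l'
          else validLogicalLoop false l') = true ↔ _
    rw [contains_closer, show (b == "+" || b == "/" || b == "(") = pvOpener b from rfl]
    by_cases hbad : (pvOpener a && pvCloser b) = true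
    · simp only [Bool.and_eq_true] at hbad
      simp only [hbad.1, hbad.2, Bool.and_self, if_true]
      simp
    · have hc : (pvOpener a && pvCloser b) = false := by
        revert hbad; cases (pvOpener a && pvCloser b) <;> simp
      have hnot : ¬(pvOpener a = true ∧ pvCloser b = true) := by
        rintro ⟨x, y⟩; simp [x, y] at hc
      rw [hc]
      simp only [Bool.false_eq_true, if_false]
      have hloop : (if pvOpener b = true then validLogicalLoop true l'
          else validLogicalLoop false l') = validLogicalLoop (pvOpener b) l' := by
        cases h : pvOpener b <;> simp [h]
      rw [hloop, ih b]
      constructor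
      · intro h
        rintro (hx | hy)
        · exact hnot hx
        · exact h hy
      · intro h hy
        exact h (Or.inr hy)

theorem validLogical_iff (toks : List String) :
    validLogical toks = true ↔ ¬ pvBad toks := by
  cases toks with
  | nil => simpa [validLogical, validLogicalLoop] using pvBad_nil
  | cons a l =>
    have hstep : validLogical (a :: l) = validLogicalLoop (pvOpener a) l := by
      cases h : pvOpener a <;>
        simp [validLogical, validLogicalLoop,
          show (a == "+" || a == "/" || a == "(") = pvOpener a from rfl, h]
    rw [hstep, validLogicalLoop_iff l a]

theorem validLogical_alt_iff (toks : List String) :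
    validLogical_alt toks = true ↔ ¬ pvBad toks := by
  unfold validLogical_alt
  rw [PySem.Set.isdisjoint_iff]
  constructor
  · intro h ⟨k, hk, h1, h2⟩
    have hmem1 : ((k : Int) + 1) ∈ PySem.Set.ofList ((PySem.List.enumerate toks).filterMap
        (fun p => if pvOpener p.2 then some (p.1 + 1) else none)) := by
      rw [PySem.Set.mem_ofList, List.mem_filterMap]
      refine ⟨((k : Int), toks[k]), ?_, by simp [h1]⟩
      rw [PySem.List.mem_enumerate_iff]
      exact ⟨k, by omega, by simp⟩
    have hmem2 : ((k : Int) + 1) ∈ PySem.Set.ofList ((PySem.List.enumerate toks).filterMap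
        (fun p => if pvCloser p.2 then some p.1 else none)) := by
      rw [PySem.Set.mem_ofList, List.mem_filterMap]
      refine ⟨(((k + 1 : Nat) : Int), toks[k + 1]), ?_, by simp [h2]⟩
      rw [PySem.List.mem_enumerate_iff]
      exact ⟨k + 1, hk, by simp⟩
    exact h _ hmem1 hmem2
  · intro h x hx1 hx2
    rw [PySem.Set.mem_ofList, List.mem_filterMap] at hx1 hx2
    obtain ⟨p, hp, hpx⟩ := hx1
    obtain ⟨q, hq, hqx⟩ := hx2
    rw [PySem.List.mem_enumerate_iff] at hp hq
    obtain ⟨k, hk, rfl⟩ := hp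
    obtain ⟨j, hj, rfl⟩ := hq
    simp only [zero_add] at hpx hqx
    by_cases ho : pvOpener toks[k] = true
    · by_cases hc : pvCloser toks[j] = true
      · simp [ho] at hpx; simp [hc] at hqx
        have hkj : j = k + 1 := by omega
        subst hkj
        exact h ⟨k, hj, ho, hc⟩
      · simp [hc] at hqx
    · simp [ho] at hpx

-- ===== VERDICT =====
theorem validLogical_spec : Claim_equal_validLogical := by
  intro response _
  unfold Spec_validLogical
  have h1 := validLogical_iff response
  have h2 := validLogical_alt_iff response
  cases ha : validLogical response with
  | true => exact ((h2.mpr (h1.mp ha)).symm)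
  | false =>
    cases hb : validLogical_alt response with
    | true => exact absurd (h1.mpr (h2.mp hb)) (by simp [ha])
    | false => rfl
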